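-- pv_equiv track=rewrite | github.com/cityofaustin/atd-finance-data | s3_to_knack.py | coalesce_records
-- ===== SOURCE A (Python) =====
-- def coalesce_records(records_current, coalesce_fields, current_pk, separator = ",\n"):
--     """ Reduces record set by comma-joining values from the specified coalesce_fields
--     that have the same primary key.
--
--     By using this function we assume that any values not specified in "coalesce_fields"
--     are identical across all records, as these values are dropped. Also, the
--     coalesce field values must be of type string or None.
--
--     At present, this exists purely to handle task order "Buyer FDU"s, which hold a
--     many-to-one relationship with task order codes. We could, alternaively, manage
--     a separate table of Buyer FDUs in Knack, but this is overkill for the use case and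
--     would add a lot of overhead on the ETL process.
--
--     Btw, the reason Buyer FDUs have a many-to-one relationship with task orders is
--     because the buyer department can have multiple "unit" codes associated with the
--     task order. These unit codes are the last four digits of the
--     FDU (Fund-Department-Unit).
--     """
--     index = {}
--     for rec in records_current:
--         _id = rec[current_pk]
--         if _id not in index.keys():
--             index[_id] = rec
--             continue
--         coal_record = index[_id]
--         for field in coalesce_fields:
--             coal_val = coal_record[field]
--             current_val = rec[field]
--             if coal_val and current_val:
--                 coal_record[field] = separator.join([coal_val, current_val])
--             elif current_val:
--                 coal_record[field] = current_val
--     return [val for key, val in index.items()]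
-- ===== SOURCE B (Python) =====
-- def coalesce_records(records_current, coalesce_fields, current_pk, separator = ",\n"):
--     """Group records by primary key, then join each coalesce field once per group."""
--     groups = {}
--     for rec in records_current:
--         groups.setdefault(rec[current_pk], []).append(rec)
--     result = []
--     for group in groups.values():
--         base = group[0]
--         if len(group) > 1:
--             for field in coalesce_fields:
--                 vals = [r[field] for r in group if r[field]]
--                 if vals:
--                     base[field] = separator.join(vals)
--         result.append(base)
--     return result
-- ===== Notes on version B (the rewrite author's own statement) =====
-- stated objective: simpler
-- what changed: B first groups records by primary key into an ordered dict of lists, then for each group joins each coalesce field exactly once over the whole column, instead of A's incremental pairwise re-joining into the stored record on every duplicate encounter.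
import Mathlib
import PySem

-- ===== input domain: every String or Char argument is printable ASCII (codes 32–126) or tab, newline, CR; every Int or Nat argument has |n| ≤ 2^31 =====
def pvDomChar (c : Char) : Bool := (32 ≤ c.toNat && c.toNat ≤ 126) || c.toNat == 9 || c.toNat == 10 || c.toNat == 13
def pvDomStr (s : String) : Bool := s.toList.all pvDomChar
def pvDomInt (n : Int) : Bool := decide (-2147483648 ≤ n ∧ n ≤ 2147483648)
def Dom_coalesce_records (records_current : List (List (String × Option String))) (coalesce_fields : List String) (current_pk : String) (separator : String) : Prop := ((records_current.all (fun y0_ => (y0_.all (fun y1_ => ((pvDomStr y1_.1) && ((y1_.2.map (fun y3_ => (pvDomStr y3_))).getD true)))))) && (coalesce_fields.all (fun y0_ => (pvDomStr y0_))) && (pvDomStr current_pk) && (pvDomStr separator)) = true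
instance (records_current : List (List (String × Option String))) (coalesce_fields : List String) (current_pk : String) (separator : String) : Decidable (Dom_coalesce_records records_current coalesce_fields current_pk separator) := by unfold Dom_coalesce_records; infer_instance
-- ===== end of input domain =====

-- B groups the records by primary key first and then joins each coalesce field once per
-- group, instead of A's incremental pairwise re-joining; equivalence is about the RETURN
-- value (both Pythons mutate the first record of each group in place).

-- ===== PORT A =====
-- Python truthiness of a str-or-None field value: None and "" are falsy.
def pvTruthy (o : Option String) : Bool :=
  match o with
  | none => false
  | some s => !(s == "")

-- rec[k] on a Python dict rec; default `none` is never reached under Pre_ (Python raises KeyError there).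
def pvGet (r : List (String × Option String)) (k : String) : Option String :=
  (PySem.Dict.mk r).getD k none

-- rec[k] = v (overwrite keeps position, new key appends — Python dict assignment).
def pvSet (r : List (String × Option String)) (k : String) (v : Option String) : List (String × Option String) :=
  ((PySem.Dict.mk r).insert k v).items

-- separator.join([coal_val, current_val]); both are truthy strings under A's guard, so .getD "" is exact.
def pvJoin2 (sep : String) (cv rv : Option String) : Option String :=
  some (PySem.Str.join sep [cv.getD "", rv.getD ""])

-- body of A's inner `for field in coalesce_fields` loop
def pvStepFieldA (sep : String) (rec c : List (String × Option String)) (f : String) : List (String × Option String) :=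
  let cv := pvGet c f
  let rv := pvGet rec f
  if pvTruthy cv && pvTruthy rv then pvSet c f (pvJoin2 sep cv rv)
  else if pvTruthy rv then pvSet c f rv
  else c

def coalesce_records (records_current : List (List (String × Option String))) (coalesce_fields : List String) (current_pk : String) (separator : String) : List (List (String × Option String)) :=
  (records_current.foldl
    (fun (index : PySem.Dict (Option String) (List (String × Option String))) rec =>
      let _id := pvGet rec current_pk
      if index.contains _id = false then index.insert _id rec
      else index.insert _id (coalesce_fields.foldl (pvStepFieldA separator rec) ((index.get? _id).getD [])))
    PySem.Dict.empty).values

-- ===== PORT B =====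
-- [r[field] for r in group if r[field]]  (the truthy values are strings, so .getD "" is exact)
def pvTruthyVals (group : List (List (String × Option String))) (f : String) : List String :=
  group.filterMap (fun r => let v := pvGet r f; if pvTruthy v then some (v.getD "") else none)

-- body of B's `for field in coalesce_fields` loop; group[0] aliases base, so the column is read off c :: rest
def pvStepFieldB (sep : String) (rest : List (List (String × Option String))) (c : List (String × Option String)) (f : String) : List (String × Option String) :=
  let vals := pvTruthyVals (c :: rest) f
  if vals.isEmpty then c else pvSet c f (some (PySem.Str.join sep vals))

-- B's per-group body: base = group[0]; join each field once when the group has more than one record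
def pvCoalesceGroup (sep : String) (F : List String) (g : List (List (String × Option String))) : List (String × Option String) :=
  match g with
  | [] => []
  | base :: rest => if rest.isEmpty then base else F.foldl (pvStepFieldB sep rest) base

def coalesce_records_alt (records_current : List (List (String × Option String))) (coalesce_fields : List String) (current_pk : String) (separator : String) : List (List (String × Option String)) :=
  ((records_current.foldl
      (fun (groups : PySem.Dict (Option String) (List (List (String × Option String)))) rec =>
        groups.modify (pvGet rec current_pk) [] (· ++ [rec]))
      PySem.Dict.empty).values).map (pvCoalesceGroup separator coalesce_fields)

-- ===== PRECONDITION & SPEC =====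
-- Pre_ excludes: records missing current_pk, or missing a coalesce field while sharing a key with
-- another record — there Python A raises KeyError; duplicate entries in coalesce_fields combined
-- with a key occurring three or more times, where A's repeated incremental re-join order is an
-- accident of its implementation (see claim cite); and, for records that share a key, association
-- lists with duplicate keys, which do not represent a Python dict.
def Pre_coalesce_records (records_current : List (List (String × Option String))) (coalesce_fields : List String) (current_pk : String) (separator : String) : Prop :=
  (∀ r ∈ records_current, (PySem.Dict.mk r).contains current_pk = true) ∧
  (coalesce_fields.Nodup ∨
    ∀ r ∈ records_current, records_current.countP (fun r' => pvGet r' current_pk == pvGet r current_pk) ≤ 2) ∧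
  (∀ r ∈ records_current,
      2 ≤ records_current.countP (fun r' => pvGet r' current_pk == pvGet r current_pk) →
      (r.map Prod.fst).Nodup ∧ ∀ f ∈ coalesce_fields, (PySem.Dict.mk r).contains f = true)
instance (records_current : List (List (String × Option String))) (coalesce_fields : List String) (current_pk : String) (separator : String) : Decidable (Pre_coalesce_records records_current coalesce_fields current_pk separator) := by unfold Pre_coalesce_records; infer_instance

def pvWitness_coalesce_records : (List (List (String × Option String))) × List String × String × String :=
  ([[("id", some "1"), ("f", some "a")], [("id", some "1"), ("f", some "b")], [("id", some "2"), ("f", none)]], ["f"], "id", ", ")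

def Spec_coalesce_records (records_current : List (List (String × Option String))) (coalesce_fields : List String) (current_pk : String) (separator : String) (out : List (List (String × Option String))) : Prop := out = coalesce_records_alt records_current coalesce_fields current_pk separator
instance (records_current : List (List (String × Option String))) (coalesce_fields : List String) (current_pk : String) (separator : String) (out : List (List (String × Option String))) : Decidable (Spec_coalesce_records records_current coalesce_fields current_pk separator out) := by unfold Spec_coalesce_records; infer_instance

-- ===== CLAIM (what is proved, stated in full; the proofs are below) =====
def Claim_equal_coalesce_records : Prop := ∀ (records_current : List (List (String × Option String))) (coalesce_fields : List String) (current_pk : String) (separator : String), Dom_coalesce_records records_current coalesce_fields current_pk separator → Pre_coalesce_records records_current coalesce_fields current_pk separator → Spec_coalesce_records records_current coalesce_fields current_pk separator (coalesce_records records_current coalesce_fields current_pk separator)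

-- ===== LEMMAS AND PROOFS =====

-- the effect of one A-step on one field value (what A's two-branch update computes)
def pvCstep (sep : String) (cv rv : Option String) : Option String :=
  if pvTruthy cv && pvTruthy rv then pvJoin2 sep cv rv else if pvTruthy rv then rv else cv

-- the truthy string values of a column
def pvTVals (v0 : Option String) (vs : List (Option String)) : List String :=
  (v0 :: vs).filterMap (fun v => if pvTruthy v then some (v.getD "") else none)

-- what B stores for one field of one group
def pvColB (sep : String) (v0 : Option String) (vs : List (Option String)) : Option String :=
  if (pvTVals v0 vs).isEmpty then v0 else some (PySem.Str.join sep (pvTVals v0 vs))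

-- A's whole-group reduction (what A's index entry for a key holds after the fold)
def pvReduceGroup (sep : String) (F : List String) (g : List (List (String × Option String))) : List (String × Option String) :=
  match g with
  | [] => []
  | b :: rest => rest.foldl (fun c r => F.foldl (pvStepFieldA sep r) c) b

-- the two top-level folds of the ports, named for the proofs
def pvAfold (sep : String) (F : List String) (pk : String) (records : List (List (String × Option String))) : PySem.Dict (Option String) (List (String × Option String)) :=
  records.foldl
    (fun index rec =>
      let _id := pvGet rec pk
      if index.contains _id = false then index.insert _id rec
      else index.insert _id (F.foldl (pvStepFieldA sep rec) ((index.get? _id).getD [])))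
    PySem.Dict.empty

def pvBfold (pk : String) (records : List (List (String × Option String))) : PySem.Dict (Option String) (List (List (String × Option String))) :=
  records.foldl (fun groups rec => groups.modify (pvGet rec pk) [] (· ++ [rec])) PySem.Dict.empty

theorem pvCharsJoin_cons_cons (s x y : List Char) (l : List (List Char)) :
    PySem.Chars.join s (x::y::l) = x ++ s ++ PySem.Chars.join s (y::l) := by
  simp [PySem.Chars.join, List.intercalate, List.intersperse]

theorem pvJoin_toList (sep : String) (l : List String) :
    (PySem.Str.join sep l).toList = PySem.Chars.join sep.toList (l.map String.toList) := by
  simp [PySem.Str.join]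

theorem pvJoin_singleton (sep : String) (a : String) : PySem.Str.join sep [a] = a := by
  apply String.toList_inj.mp
  simp [PySem.Str.join, PySem.Chars.join, List.intercalate]

theorem pvJoin_join2 (sep a b : String) (l : List String) :
    PySem.Str.join sep (PySem.Str.join sep [a, b] :: l) = PySem.Str.join sep (a :: b :: l) := by
  apply String.toList_inj.mp
  cases l with
  | nil => simp [PySem.Str.join, PySem.Chars.join, List.intercalate, List.intersperse]
  | cons c l' =>
    have h2 : (PySem.Str.join sep [a, b]).toList = a.toList ++ sep.toList ++ b.toList := by
      rw [pvJoin_toList]; simp [PySem.Chars.join, List.intercalate, List.intersperse]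
    rw [pvJoin_toList, pvJoin_toList]
    simp only [List.map_cons, pvCharsJoin_cons_cons, h2]
    simp [List.append_assoc]

theorem pvTruthy_join (sep : String) (a : String) (l : List String) (ha : a ≠ "") :
    pvTruthy (some (PySem.Str.join sep (a :: l))) = true := by
  have ha' : a.toList ≠ [] := by
    intro h; exact ha (String.toList_inj.mp (by simp [h]))
  have h : (PySem.Str.join sep (a :: l)).toList ≠ [] := by
    cases l with
    | nil => simpa [PySem.Str.join, PySem.Chars.join, List.intercalate]
    | cons c l' =>
      rw [pvJoin_toList, List.map_cons, List.map_cons, pvCharsJoin_cons_cons]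
      simp_all
  simp only [pvTruthy, Bool.not_eq_eq_eq_not, Bool.not_true, beq_eq_false_iff_ne, ne_eq]
  intro he
  exact h (by simp [he])

theorem pvTruthy_eq_some (v : Option String) (h : pvTruthy v = true) : v = some (v.getD "") := by
  cases v with
  | none => simp [pvTruthy] at h
  | some s => rfl

theorem pvTruthy_getD_ne (v : Option String) (h : pvTruthy v = true) : v.getD "" ≠ "" := by
  cases v with
  | none => simp [pvTruthy] at h
  | some s => simpa [pvTruthy] using h

theorem pvCol_eq (sep : String) (vs : List (Option String)) : ∀ v0,
    vs.foldl (pvCstep sep) v0 = pvColB sep v0 vs := by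
  induction vs with
  | nil =>
    intro v0
    cases hv0 : pvTruthy v0 with
    | false => simp [pvColB, pvTVals, hv0]
    | true =>
      simp [pvColB, pvTVals, hv0, pvJoin_singleton]
      exact pvTruthy_eq_some v0 hv0
  | cons v vs ih =>
    intro v0
    rw [List.foldl_cons, ih]
    cases hv0 : pvTruthy v0 with
    | false =>
      cases hv : pvTruthy v with
      | false =>
        simp [pvCstep, hv0, hv, pvColB, pvTVals]
      | true =>
        simp [pvCstep, hv0, hv, pvColB, pvTVals]
    | true =>
      cases hv : pvTruthy v with
      | false =>
        simp [pvCstep, hv0, hv, pvColB, pvTVals]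
      | true =>
        have ha : v0.getD "" ≠ "" := pvTruthy_getD_ne v0 hv0
        have hj : pvTruthy (some (PySem.Str.join sep [v0.getD "", v.getD ""])) = true :=
          pvTruthy_join sep _ [v.getD ""] ha
        simp [pvCstep, hv0, hv, pvColB, pvTVals, pvJoin2, hj,
          pvJoin_join2]

theorem pvMk_items {κ ν : Type} [BEq κ] (d : PySem.Dict κ ν) : PySem.Dict.mk d.items = d := rfl

theorem pvGet_pvSet (r : List (String × Option String)) (f x : String) (v : Option String) :
    pvGet (pvSet r f v) x = if x = f then v else pvGet r x := by
  unfold pvGet pvSet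
  rw [pvMk_items, PySem.Dict.getD_insert]

theorem pvKeys_mk (r : List (String × Option String)) : (PySem.Dict.mk r).keys = r.map Prod.fst := rfl

theorem pvKeys_pvSet (r : List (String × Option String)) (f : String) (v : Option String)
    (h : f ∈ r.map Prod.fst) : (pvSet r f v).map Prod.fst = r.map Prod.fst := by
  unfold pvSet
  have hc : (PySem.Dict.mk r).contains f = true := by
    rw [PySem.Dict.contains_iff_mem_keys]; exact h
  rw [PySem.Dict.items_insert_of_contains _ _ hc]
  show List.map Prod.fst (List.map _ r) = _
  rw [List.map_map]
  apply List.map_congr_left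
  intro p _
  by_cases hp : p.1 = f <;> simp [hp]

theorem pvContains_iff (r : List (String × Option String)) (f : String) :
    (PySem.Dict.mk r).contains f = true ↔ f ∈ r.map Prod.fst := by
  rw [PySem.Dict.contains_iff_mem_keys, pvKeys_mk]

theorem pvStepA_getD (sep : String) (rec c : List (String × Option String)) (f x : String) :
    pvGet (pvStepFieldA sep rec c f) x = if x = f then pvCstep sep (pvGet c f) (pvGet rec f) else pvGet c x := by
  unfold pvStepFieldA pvCstep
  dsimp only
  split_ifs <;> simp_all [pvGet_pvSet]

theorem pvStepA_keys (sep : String) (rec c : List (String × Option String)) (f : String)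
    (h : f ∈ c.map Prod.fst) : (pvStepFieldA sep rec c f).map Prod.fst = c.map Prod.fst := by
  unfold pvStepFieldA
  dsimp only
  split_ifs <;> simp [pvKeys_pvSet _ _ _ h]

theorem pvInnerA_getD (sep : String) (rec : List (String × Option String)) (F : List String)
    (hF : F.Nodup) : ∀ (c : List (String × Option String)) (x : String),
    pvGet (F.foldl (pvStepFieldA sep rec) c) x
      = if x ∈ F then pvCstep sep (pvGet c x) (pvGet rec x) else pvGet c x := by
  induction F with
  | nil => intro c x; simp
  | cons f F ih =>
    intro c x
    rw [List.foldl_cons, ih (List.nodup_cons.mp hF).2]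
    by_cases hx : x = f
    · subst hx
      have hxF : x ∉ F := (List.nodup_cons.mp hF).1
      simp [hxF, pvStepA_getD]
    · rw [pvStepA_getD]
      by_cases hxF : x ∈ F <;> simp [hx, hxF]

theorem pvInnerA_keys (sep : String) (rec : List (String × Option String)) (F : List String) :
    ∀ (c : List (String × Option String)), (∀ f ∈ F, f ∈ c.map Prod.fst) →
    (F.foldl (pvStepFieldA sep rec) c).map Prod.fst = c.map Prod.fst := by
  induction F with
  | nil => intro c _; simp
  | cons f F ih =>
    intro c h
    rw [List.foldl_cons]
    have hk : (pvStepFieldA sep rec c f).map Prod.fst = c.map Prod.fst :=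
      pvStepA_keys sep rec c f (h f (by simp))
    rw [ih _ (fun g hg => hk ▸ h g (by simp [hg])), hk]

theorem pvStepB_getD (sep : String) (rest : List (List (String × Option String))) (c : List (String × Option String)) (f x : String) :
    pvGet (pvStepFieldB sep rest c f) x
      = if x = f then pvColB sep (pvGet c f) (rest.map (fun r => pvGet r f)) else pvGet c x := by
  have hv : pvTruthyVals (c :: rest) f = pvTVals (pvGet c f) (rest.map (fun r => pvGet r f)) := by
    unfold pvTruthyVals pvTVals
    rw [show (pvGet c f :: rest.map (fun r => pvGet r f)) = (c :: rest).map (fun r => pvGet r f) from rfl,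
      List.filterMap_map]
    rfl
  unfold pvStepFieldB pvColB
  dsimp only
  rw [hv]
  split_ifs <;> simp_all [pvGet_pvSet]

theorem pvStepB_keys (sep : String) (rest : List (List (String × Option String))) (c : List (String × Option String)) (f : String)
    (h : f ∈ c.map Prod.fst) : (pvStepFieldB sep rest c f).map Prod.fst = c.map Prod.fst := by
  unfold pvStepFieldB
  dsimp only
  split_ifs <;> simp [pvKeys_pvSet _ _ _ h]

theorem pvInnerB_getD (sep : String) (rest : List (List (String × Option String))) (F : List String)
    (hF : F.Nodup) : ∀ (c : List (String × Option String)) (x : String),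
    pvGet (F.foldl (pvStepFieldB sep rest) c) x
      = if x ∈ F then pvColB sep (pvGet c x) (rest.map (fun r => pvGet r x)) else pvGet c x := by
  induction F with
  | nil => intro c x; simp
  | cons f F ih =>
    intro c x
    rw [List.foldl_cons, ih (List.nodup_cons.mp hF).2]
    by_cases hx : x = f
    · subst hx
      have hxF : x ∉ F := (List.nodup_cons.mp hF).1
      simp [hxF, pvStepB_getD]
    · rw [pvStepB_getD]
      by_cases hxF : x ∈ F <;> simp [hx, hxF]

theorem pvInnerB_keys (sep : String) (rest : List (List (String × Option String))) (F : List String) :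
    ∀ (c : List (String × Option String)), (∀ f ∈ F, f ∈ c.map Prod.fst) →
    (F.foldl (pvStepFieldB sep rest) c).map Prod.fst = c.map Prod.fst := by
  induction F with
  | nil => intro c _; simp
  | cons f F ih =>
    intro c h
    rw [List.foldl_cons]
    have hk : (pvStepFieldB sep rest c f).map Prod.fst = c.map Prod.fst :=
      pvStepB_keys sep rest c f (h f (by simp))
    rw [ih _ (fun g hg => hk ▸ h g (by simp [hg])), hk]

theorem pvReduce_getD (sep : String) (F : List String) (hF : F.Nodup) (rest : List (List (String × Option String))) :
    ∀ (b : List (String × Option String)) (x : String),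
    pvGet (rest.foldl (fun c r => F.foldl (pvStepFieldA sep r) c) b) x
      = if x ∈ F then (rest.map (fun r => pvGet r x)).foldl (pvCstep sep) (pvGet b x) else pvGet b x := by
  induction rest with
  | nil => intro b x; simp
  | cons r rest ih =>
    intro b x
    rw [List.foldl_cons, ih]
    by_cases hx : x ∈ F
    · simp only [hx, if_true, List.map_cons, List.foldl_cons]
      rw [pvInnerA_getD sep r F hF]
      simp [hx]
    · simp only [hx, if_false]
      rw [pvInnerA_getD sep r F hF]
      simp [hx]

theorem pvReduce_keys (sep : String) (F : List String) (rest : List (List (String × Option String))) :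
    ∀ (b : List (String × Option String)), (∀ f ∈ F, f ∈ b.map Prod.fst) →
    (rest.foldl (fun c r => F.foldl (pvStepFieldA sep r) c) b).map Prod.fst = b.map Prod.fst := by
  induction rest with
  | nil => intro b _; simp
  | cons r rest ih =>
    intro b h
    rw [List.foldl_cons]
    have hk : (F.foldl (pvStepFieldA sep r) b).map Prod.fst = b.map Prod.fst := pvInnerA_keys sep r F b h
    rw [ih _ (fun g hg => hk ▸ h g hg), hk]

theorem pvRec_ext (r : List (String × Option String)) (h : (r.map Prod.fst).Nodup) :
    r = (r.map Prod.fst).map (fun k => (k, pvGet r k)) := by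
  have := PySem.Dict.items_eq_map_keys (PySem.Dict.mk r) (by exact h) (none : Option String)
  exact this

theorem pvGroup_eq (sep : String) (F : List String) (hF : F.Nodup)
    (b : List (String × Option String)) (rest : List (List (String × Option String)))
    (hb : rest ≠ [] → (b.map Prod.fst).Nodup)
    (hpres : rest ≠ [] → ∀ f ∈ F, f ∈ b.map Prod.fst) :
    pvReduceGroup sep F (b :: rest) = pvCoalesceGroup sep F (b :: rest) := by
  unfold pvReduceGroup pvCoalesceGroup
  cases rest with
  | nil => simp
  | cons r0 rest' =>
    simp only [List.isEmpty_cons, if_false, Bool.false_eq_true]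
    have hb' := hb (by simp)
    have hpres' := hpres (by simp)
    have kL := pvReduce_keys sep F (r0 :: rest') b hpres'
    have kR := pvInnerB_keys sep (r0 :: rest') F b hpres'
    have hndL : (((r0 :: rest').foldl (fun c r => F.foldl (pvStepFieldA sep r) c) b).map Prod.fst).Nodup := by
      rw [kL]; exact hb'
    have hndR : ((F.foldl (pvStepFieldB sep (r0 :: rest')) b).map Prod.fst).Nodup := by
      rw [kR]; exact hb'
    rw [pvRec_ext _ hndL, pvRec_ext _ hndR, kL, kR]
    apply List.map_congr_left
    intro k _
    rw [pvReduce_getD sep F hF, pvInnerB_getD sep (r0 :: rest') F hF]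
    by_cases hk : k ∈ F
    · simp only [hk, if_true]
      rw [pvCol_eq]
    · simp [hk]

theorem pvTruthy_get_mem (c : List (String × Option String)) (f : String)
    (h : pvTruthy (pvGet c f) = true) : f ∈ c.map Prod.fst := by
  by_contra hf
  have : (PySem.Dict.mk c).get? f = none := by
    rw [PySem.Dict.get?_eq_none_iff_not_mem_keys]
    exact hf
  rw [pvGet, PySem.Dict.getD_eq_get?_getD, this] at h
  simp [pvTruthy] at h

theorem pvSet_self (c : List (String × Option String)) (f : String)
    (hnd : (c.map Prod.fst).Nodup) (hf : f ∈ c.map Prod.fst) :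
    pvSet c f (pvGet c f) = c := by
  have hk := pvKeys_pvSet c f (pvGet c f) hf
  have hnd' : ((pvSet c f (pvGet c f)).map Prod.fst).Nodup := by rw [hk]; exact hnd
  rw [pvRec_ext _ hnd', hk]
  conv_rhs => rw [pvRec_ext c hnd]
  apply List.map_congr_left
  intro k _
  rw [pvGet_pvSet]
  split_ifs with h
  · rw [h]
  · rfl

theorem pvNodup_pvSet (c : List (String × Option String)) (f : String) (v : Option String)
    (hnd : (c.map Prod.fst).Nodup) : ((pvSet c f v).map Prod.fst).Nodup := by
  by_cases hf : f ∈ c.map Prod.fst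
  · rw [pvKeys_pvSet c f v hf]; exact hnd
  · have hc : (PySem.Dict.mk c).contains f = false := by
      rw [← Bool.not_eq_true, PySem.Dict.contains_iff_mem_keys]
      exact hf
    unfold pvSet
    rw [PySem.Dict.items_insert_of_not_contains _ _ hc]
    simp only [List.map_append, List.map_cons, List.map_nil]
    refine List.nodup_append.mpr ⟨hnd, List.nodup_singleton _, ?_⟩
    intro a ha b hb
    simp only [List.mem_singleton] at hb
    subst hb
    intro h; subst h
    exact hf ha

theorem pvStepA_nodup (sep : String) (r c : List (String × Option String)) (f : String)
    (hnd : (c.map Prod.fst).Nodup) : ((pvStepFieldA sep r c f).map Prod.fst).Nodup := by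
  unfold pvStepFieldA
  dsimp only
  split_ifs <;> first | exact pvNodup_pvSet _ _ _ hnd | exact hnd

theorem pvStep2_eq (sep : String) (r c : List (String × Option String)) (f : String)
    (hnd : (c.map Prod.fst).Nodup) : pvStepFieldA sep r c f = pvStepFieldB sep [r] c f := by
  unfold pvStepFieldA pvStepFieldB pvTruthyVals
  dsimp only
  cases hcv : pvTruthy (pvGet c f) with
  | true =>
    cases hrv : pvTruthy (pvGet r f) with
    | true => simp [hcv, hrv, pvJoin2]
    | false =>
      simp only [hcv, hrv, Bool.and_false, Bool.false_eq_true, if_false,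
        List.filterMap_cons, List.filterMap_nil, if_true, if_false]
      rw [if_neg (by simp), pvJoin_singleton]
      rw [← pvTruthy_eq_some _ hcv, pvSet_self c f hnd (pvTruthy_get_mem c f hcv)]
  | false =>
    cases hrv : pvTruthy (pvGet r f) with
    | true =>
      simp only [hcv, hrv, Bool.false_and, Bool.false_eq_true, if_false, if_true,
        List.filterMap_cons, List.filterMap_nil]
      rw [if_neg (by simp), pvJoin_singleton, ← pvTruthy_eq_some _ hrv]
    | false => simp [hcv, hrv]

theorem pvGroup2_eq (sep : String) (r : List (String × Option String)) (F : List String) :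
    ∀ (b : List (String × Option String)), (b.map Prod.fst).Nodup →
    F.foldl (pvStepFieldA sep r) b = F.foldl (pvStepFieldB sep [r]) b := by
  induction F with
  | nil => intro b _; rfl
  | cons f F ih =>
    intro b hnd
    rw [List.foldl_cons, List.foldl_cons, pvStep2_eq sep r b f hnd,
      ih _ (pvStep2_eq sep r b f hnd ▸ pvStepA_nodup sep r b f hnd)]

theorem pvBfold_nodup_keys (pk : String) (records : List (List (String × Option String))) :
    (pvBfold pk records).keys.Nodup := by
  exact PySem.Dict.nodup_keys_foldl_modify_key records (fun rec => pvGet rec pk) []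
    (fun _ rec => (· ++ [rec])) PySem.Dict.empty (by simp)

theorem pvBfold_append (pk : String) (records : List (List (String × Option String))) (rec : List (String × Option String)) :
    pvBfold pk (records ++ [rec])
      = (pvBfold pk records).insert (pvGet rec pk) ((pvBfold pk records).getD (pvGet rec pk) [] ++ [rec]) := by
  unfold pvBfold
  rw [List.foldl_append]
  rfl

theorem pvAfold_append (sep : String) (F : List String) (pk : String) (records : List (List (String × Option String))) (rec : List (String × Option String)) :
    pvAfold sep F pk (records ++ [rec])
      = (if (pvAfold sep F pk records).contains (pvGet rec pk) = false then (pvAfold sep F pk records).insert (pvGet rec pk) rec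
         else (pvAfold sep F pk records).insert (pvGet rec pk) (F.foldl (pvStepFieldA sep rec) (((pvAfold sep F pk records).get? (pvGet rec pk)).getD []))) := by
  unfold pvAfold
  rw [List.foldl_append]
  rfl

theorem pvBfold_ne_nil (pk : String) (records : List (List (String × Option String))) :
    ∀ p ∈ (pvBfold pk records).items, p.2 ≠ [] := by
  induction records using List.reverseRecOn with
  | nil => intro p hp; simp [pvBfold, PySem.Dict.empty] at hp
  | append_singleton l rec ih =>
    intro p hp
    rw [pvBfold_append] at hp
    rcases (PySem.Dict.mem_items_insert _ _ _ _).mp hp with h | ⟨h, _⟩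
    · subst h; simp
    · exact ih p h

theorem pvFold_items (sep : String) (F : List String) (pk : String) (records : List (List (String × Option String))) :
    (pvAfold sep F pk records).items
      = (pvBfold pk records).items.map (fun p => (p.1, pvReduceGroup sep F p.2)) := by
  induction records using List.reverseRecOn with
  | nil => rfl
  | append_singleton l rec ih =>
    have hkeys : (pvAfold sep F pk l).keys = (pvBfold pk l).keys := by
      unfold PySem.Dict.keys
      rw [ih, List.map_map]
      rfl
    have hcont : ∀ k, (pvAfold sep F pk l).contains k = (pvBfold pk l).contains k := by
      intro k
      rw [PySem.Dict.contains_eq_decide_mem_keys, PySem.Dict.contains_eq_decide_mem_keys, hkeys]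
    rw [pvAfold_append, pvBfold_append]
    set k := pvGet rec pk with hk
    cases hc : (pvBfold pk l).contains k with
    | false =>
      rw [hcont k, hc]
      simp only [if_true]
      rw [PySem.Dict.items_insert_of_not_contains _ _ hc,
        PySem.Dict.items_insert_of_not_contains _ _ (by rw [hcont k, hc]),
        PySem.Dict.getD_of_not_contains _ _ hc, ih, List.map_append]
      rfl
    | true =>
      rw [hcont k, hc]
      simp only [Bool.true_eq_false, if_false]
      -- get? on the B side is some g
      obtain ⟨g, hg⟩ : ∃ g, (pvBfold pk l).get? k = some g := by
        have := PySem.Dict.contains_eq_isSome_get? (pvBfold pk l) k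
        rw [hc] at this
        exact Option.isSome_iff_exists.mp this.symm
      have hgetA : (pvAfold sep F pk l).get? k = some (pvReduceGroup sep F g) := by
        show Option.map (fun x => x.2) (List.find? (fun p => p.1 == k) (pvAfold sep F pk l).items) = _
        rw [ih, List.find?_map]
        have : ((fun (p : (Option String) × List (String × Option String)) => p.1 == k) ∘
            (fun (p : (Option String) × List (List (String × Option String))) => (p.1, pvReduceGroup sep F p.2)))
            = (fun (p : (Option String) × List (List (String × Option String))) => p.1 == k) := rfl
        rw [this]
        have hgB : Option.map (fun (x : (Option String) × List (List (String × Option String))) => x.2) (List.find? (fun p => p.1 == k) (pvBfold pk l).items) = some g := hg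
        cases hfind : List.find? (fun p => p.1 == k) (pvBfold pk l).items with
        | none => rw [hfind] at hgB; simp at hgB
        | some q =>
          rw [hfind] at hgB
          simp at hgB
          simp [hgB]
      have hgne : g ≠ [] := by
        exact pvBfold_ne_nil pk l (k, g) (PySem.Dict.mem_items_of_get?_eq_some _ hg)
      have hred : pvReduceGroup sep F (g ++ [rec]) = F.foldl (pvStepFieldA sep rec) (pvReduceGroup sep F g) := by
        cases g with
        | nil => exact absurd rfl hgne
        | cons b tail =>
          show (tail ++ [rec]).foldl (fun c r => F.foldl (pvStepFieldA sep r) c) b = _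
          rw [List.foldl_append]
          rfl
      rw [PySem.Dict.getD_of_get?_eq_some _ _ hg, hgetA,
        PySem.Dict.items_insert_of_contains _ _ (by rw [hcont k, hc]),
        PySem.Dict.items_insert_of_contains _ _ hc, ih, List.map_map, List.map_map]
      apply List.map_congr_left
      intro p _
      by_cases hp : p.1 == k
      · simp only [Function.comp_apply, hp, if_true]
        simp [hred]
      · simp only [Function.comp_apply]
        rw [if_neg (by simp_all), if_neg (by simp_all)]

theorem pvGroups_getD (pk : String) (records : List (List (String × Option String))) (k : Option String) :
    (pvBfold pk records).getD k [] = records.filter (fun r => pvGet r pk == k) := by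
  have h1 : pvBfold pk records
      = (records.map (fun r => (pvGet r pk, r))).foldl (fun d p => d.modify p.1 [] (· ++ [p.2])) PySem.Dict.empty := by
    unfold pvBfold
    rw [List.foldl_map]
  rw [h1, PySem.Dict.getD_foldl_modify_append, PySem.Dict.getD_empty, List.filter_map, List.map_map]
  rw [show ((fun (x : (Option String) × List (String × Option String)) => x.2) ∘ fun r => (pvGet r pk, r)) = id from rfl,
    List.map_id, List.nil_append]
  rfl

-- ===== VERDICT (by name: the statement is the Claim_ definition above) =====
theorem coalesce_records_spec : Claim_equal_coalesce_records := by
  unfold Claim_equal_coalesce_records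
  intro records F pk sep _hdom hpre
  unfold Spec_coalesce_records
  obtain ⟨_hpk, hFsmall, hgrp⟩ := hpre
  have hA : coalesce_records records F pk sep = (pvAfold sep F pk records).values := rfl
  have hB : coalesce_records_alt records F pk sep
      = ((pvBfold pk records).values).map (pvCoalesceGroup sep F) := rfl
  rw [hA, hB]
  show ((pvAfold sep F pk records).items.map (fun x => x.2))
      = ((pvBfold pk records).items.map (fun x => x.2)).map (pvCoalesceGroup sep F)
  rw [pvFold_items, List.map_map, List.map_map]
  apply List.map_congr_left
  intro p hp
  show pvReduceGroup sep F p.2 = pvCoalesceGroup sep F p.2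
  have hnd := pvBfold_nodup_keys pk records
  have hgd : (pvBfold pk records).getD p.1 [] = p.2 :=
    PySem.Dict.getD_of_mem_items _ (by simpa using hp) hnd []
  have hfilter : p.2 = records.filter (fun r => pvGet r pk == p.1) := by
    rw [← hgd, pvGroups_getD]
  have hne : p.2 ≠ [] := pvBfold_ne_nil pk records p hp
  cases hval : p.2 with
  | nil => exact absurd hval hne
  | cons b rest =>
    have hbf : b ∈ records.filter (fun r => pvGet r pk == p.1) := by
      rw [← hfilter, hval]; simp
    have hbmem : b ∈ records := List.mem_of_mem_filter hbf
    have hbk : (pvGet b pk == p.1) = true := (List.mem_filter.mp hbf).2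
    have hkb : pvGet b pk = p.1 := beq_iff_eq.mp hbk
    have hcount : rest ≠ [] → 2 ≤ records.countP (fun r => pvGet r pk == pvGet b pk) := by
      intro hrest
      simp only [hkb]
      rw [List.countP_eq_length_filter, ← hfilter, hval]
      cases rest with
      | nil => exact absurd rfl hrest
      | cons _ _ => simp
    have hb : rest ≠ [] → (b.map Prod.fst).Nodup := fun hrest =>
      (hgrp b hbmem (hcount hrest)).1
    have hpres : rest ≠ [] → ∀ f ∈ F, f ∈ b.map Prod.fst := fun hrest f hf =>
      (pvContains_iff b f).mp ((hgrp b hbmem (hcount hrest)).2 f hf)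
    cases hFsmall with
    | inl hFnd => exact pvGroup_eq sep F hFnd b rest hb hpres
    | inr hsmall =>
      have hlen : (b :: rest).length ≤ 2 := by
        have h1 := hsmall b hbmem
        have h2 : records.countP (fun r => pvGet r pk == pvGet b pk) = (b :: rest).length := by
          simp only [hkb]
          rw [List.countP_eq_length_filter, ← hfilter, hval]
        omega
      cases rest with
      | nil => rfl
      | cons r0 rest' =>
        have hr' : rest' = [] := by
          cases rest' with
          | nil => rfl
          | cons _ _ => simp at hlen
        subst hr'
        have hbnd : (b.map Prod.fst).Nodup := hb (by simp)
        simpa [pvReduceGroup, pvCoalesceGroup] using pvGroup2_eq sep r0 F b hbnd
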